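-- pv_equiv track=rewrite | github.com/ice-code1/Learnable- | my_learnable_result.py | nth_most_rate_signature
-- ===== SOURCE A (Python) =====
-- def nth_most_rate_signature(array:list, n:int):
--
--     # condition to check for items outside the scope of the array
--     if n < len(array):
--
--         #creating empty dictionary
--         digitDict = {}
--         #storing the list as a dictionary
--
--         for digit in array:
--             digitDict[digit] = digitDict.get(digit, 0) + 1
--         #sort the dictionary into key value pairs
--         # where the key = values and the values = no of time they occur
--         sortedDict = sorted(digitDict.items(), key=lambda item: item[1])
--
--         #return the sorted dictionary
--         return sortedDict[n - 1][0]
--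
--     # condition when
--     else:
--         return ("not in list")
-- ===== SOURCE B (Python) =====
-- def nth_most_rate_signature(array: list, n: int):
--     if n >= len(array):
--         return ("not in list")
--     # count frequencies
--     counts = {}
--     for x in array:
--         counts[x] = counts.get(x, 0) + 1
--     # walk the distinct frequencies in ascending order, collecting the keys
--     # of each frequency in dict insertion order (= stable-sort tie order)
--     flat = [k for c in sorted(set(counts.values()))
--               for k, v in counts.items() if v == c]
--     return flat[n - 1]
-- ===== Notes on version B (the rewrite author's own statement) =====
-- stated objective: alternative
-- what changed: Instead of stable-sorting the (key, count) pairs by count and indexing the sorted pairs, B walks the distinct counts in ascending order and concatenates, per count, the keys holding that count in dict insertion order, then indexes that flat key list.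
import Mathlib
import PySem

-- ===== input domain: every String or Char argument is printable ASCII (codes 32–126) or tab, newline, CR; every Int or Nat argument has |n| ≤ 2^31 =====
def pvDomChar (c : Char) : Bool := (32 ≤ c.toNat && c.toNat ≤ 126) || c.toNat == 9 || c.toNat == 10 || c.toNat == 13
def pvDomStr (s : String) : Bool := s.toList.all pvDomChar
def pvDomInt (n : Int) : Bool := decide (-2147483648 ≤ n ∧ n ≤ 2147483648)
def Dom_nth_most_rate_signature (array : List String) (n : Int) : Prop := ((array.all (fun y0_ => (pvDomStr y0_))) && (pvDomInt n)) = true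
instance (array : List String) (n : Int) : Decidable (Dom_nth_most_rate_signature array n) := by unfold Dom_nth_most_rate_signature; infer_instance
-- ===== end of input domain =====

-- B replaces the stable sort of (key, count) pairs by a different selection step: it walks the
-- distinct counts in ascending order and collects the keys of each count in dict insertion order
-- ('alternative' objective; same return value everywhere A returns).

-- ===== PORT A =====
def nth_most_rate_signature (array : List String) (n : Int) : String :=
  if n < (array.length : Int) then
    let digitDict : PySem.Dict String Int :=
      array.foldl (fun d digit => d.insert digit (d.getD digit 0 + 1)) PySem.Dict.empty
    let sortedDict := PySem.List.sorted digitDict.items (fun item => item.2) false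
    match PySem.List.pyGet? sortedDict (n - 1) with
    | some p => p.1
    | none => ""   -- IndexError in Python; excluded by Pre_
  else "not in list"

-- ===== PORT B =====
def nth_most_rate_signature_alt (array : List String) (n : Int) : String :=
  if (array.length : Int) ≤ n then "not in list"
  else
    let counts : PySem.Dict String Int :=
      array.foldl (fun d x => d.insert x (d.getD x 0 + 1)) PySem.Dict.empty
    let flat : List String :=
      (PySem.List.sorted (PySem.Set.ofList counts.values) (fun c => c) false).flatMap
        (fun c => (counts.items.filter (fun kv => kv.2 == c)).map (fun kv => kv.1))
    match PySem.List.pyGet? flat (n - 1) with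
    | some k => k
    | none => ""   -- IndexError in Python; excluded by Pre_

-- ===== PRECONDITION & SPEC =====
-- Pre_ excludes exactly the inputs where Python A raises IndexError: n < len(array) but the
-- index n - 1 falls outside the list of distinct elements (B raises IndexError there too).
def Pre_nth_most_rate_signature (array : List String) (n : Int) : Prop :=
  (array.length : Int) ≤ n ∨ PySem.Raise.InRange (PySem.List.dedup array).length (n - 1)
instance (array : List String) (n : Int) : Decidable (Pre_nth_most_rate_signature array n) := by
  unfold Pre_nth_most_rate_signature; infer_instance

def pvWitness_nth_most_rate_signature : List String × Int := (["a", "b", "a"], 1)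

def Spec_nth_most_rate_signature (array : List String) (n : Int) (out : String) : Prop := out = nth_most_rate_signature_alt array n
instance (array : List String) (n : Int) (out : String) : Decidable (Spec_nth_most_rate_signature array n out) := by unfold Spec_nth_most_rate_signature; infer_instance

-- ===== CLAIM (what is proved, stated in full; the proofs are below) =====
def Claim_equal_nth_most_rate_signature : Prop := ∀ (array : List String) (n : Int), Dom_nth_most_rate_signature array n → Pre_nth_most_rate_signature array n → Spec_nth_most_rate_signature array n (nth_most_rate_signature array n)

-- ===== LEMMAS AND PROOFS =====

-- pyGet? commutes with map
theorem pyGet?_map_fst {α β : Type} (l : List α) (f : α → β) (i : Int) :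
    PySem.List.pyGet? (l.map f) i = (PySem.List.pyGet? l i).map f := by
  simp [PySem.List.pyGet?, Option.map_bind]

-- inserting x into a key-sorted list: the filter on a fixed key value gains x at the END iff x has that value
theorem filter_insertBy (c : Int) (x : String × Int) (acc : List (String × Int))
    (hs : acc.Pairwise (fun a b => a.2 ≤ b.2)) :
    (PySem.List.insertBy (fun a b => decide (a.2 < b.2)) x acc).filter (fun y => y.2 == c)
      = acc.filter (fun y => y.2 == c) ++ (if x.2 == c then [x] else []) := by
  induction acc with
  | nil => by_cases hc : x.2 = c <;> simp [PySem.List.insertBy, List.filter, hc]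
  | cons y ys ih =>
    rw [List.pairwise_cons] at hs
    by_cases h : x.2 < y.2
    · have hstep : PySem.List.insertBy (fun a b => decide (a.2 < b.2)) x (y :: ys) = x :: y :: ys := by
        simp [PySem.List.insertBy, h]
      rw [hstep]
      by_cases hc : x.2 = c
      · have hnone : (y :: ys).filter (fun z => z.2 == c) = [] := by
          rw [List.filter_eq_nil_iff]
          intro z hz
          have hz2 : y.2 ≤ z.2 := by
            rcases List.mem_cons.mp hz with h1 | h1
            · exact h1 ▸ le_refl _
            · exact hs.1 z h1
          simp only [beq_iff_eq]
          omega
        rw [List.filter_cons_of_pos (by simp [hc]), hnone]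
        simp [hc]
      · rw [List.filter_cons_of_neg (by simp [hc])]
        simp [hc]
    · have hstep : PySem.List.insertBy (fun a b => decide (a.2 < b.2)) x (y :: ys)
          = y :: PySem.List.insertBy (fun a b => decide (a.2 < b.2)) x ys := by
        simp [PySem.List.insertBy, h]
      rw [hstep, List.filter_cons, List.filter_cons, ih hs.2]
      by_cases hy : y.2 = c <;> simp [hy]

-- STABILITY: filtering the stable sort on one key value gives the original filter
theorem filter_sorted (ps : List (String × Int)) (c : Int) :
    (PySem.List.sorted ps (fun p => p.2) false).filter (fun y => y.2 == c)
      = ps.filter (fun y => y.2 == c) := by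
  induction ps using List.reverseRecOn with
  | nil => simp [PySem.List.sorted]
  | append_singleton ps x ih =>
    rw [PySem.List.sorted_eq_foldl_insertBy, List.foldl_append, List.foldl_cons, List.foldl_nil,
        ← PySem.List.sorted_eq_foldl_insertBy,
        filter_insertBy c x _ (PySem.List.sorted_pairwise ps (fun p => p.2)), ih,
        List.filter_append]
    by_cases hc : x.2 = c <;> simp [hc]

-- a key-sorted list with all keys ≥ c splits into its c-block (a prefix) and the rest
theorem filter_split (qs : List (String × Int)) (c : Int)
    (hs : qs.Pairwise (fun a b => a.2 ≤ b.2)) (hmin : ∀ q ∈ qs, c ≤ q.2) :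
    qs.filter (fun y => y.2 == c) ++ qs.filter (fun y => !(y.2 == c)) = qs := by
  induction qs with
  | nil => simp
  | cons q qs ih =>
    rw [List.pairwise_cons] at hs
    by_cases hq : q.2 = c
    · have h2 : ∀ z ∈ qs, c ≤ z.2 := fun z hz => hmin z (List.mem_cons_of_mem _ hz)
      rw [List.filter_cons_of_pos (by simp [hq]), List.filter_cons_of_neg (by simp [hq]),
          List.cons_append, ih hs.2 h2]
    · have hlt : c < q.2 := lt_of_le_of_ne (hmin q List.mem_cons_self) (Ne.symm hq)
      have hnone : qs.filter (fun y => y.2 == c) = [] := by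
        rw [List.filter_eq_nil_iff]
        intro z hz
        have := hs.1 z hz
        simp only [beq_iff_eq]
        omega
      have hall : qs.filter (fun y => !(y.2 == c)) = qs := by
        rw [List.filter_eq_self]
        intro z hz
        have := hs.1 z hz
        simp only [Bool.not_eq_eq_eq_not, Bool.not_true, beq_eq_false_iff_ne]
        omega
      rw [List.filter_cons_of_neg (by simp [hq]), List.filter_cons_of_pos (by simp [hq]),
          hnone, hall]
      simp

-- flatMapping the per-value filters over the strictly increasing value list rebuilds the sorted list
theorem flatMap_filter_eq (cs : List Int) (qs : List (String × Int))
    (hcs : cs.Pairwise (· < ·)) (hs : qs.Pairwise (fun a b => a.2 ≤ b.2))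
    (hmem : ∀ q ∈ qs, q.2 ∈ cs) :
    cs.flatMap (fun c => qs.filter (fun y => y.2 == c)) = qs := by
  induction cs generalizing qs with
  | nil =>
    cases qs with
    | nil => simp
    | cons q qs => exact absurd (hmem q List.mem_cons_self) (by simp)
  | cons c cs ih =>
    rw [List.pairwise_cons] at hcs
    have hmin : ∀ q ∈ qs, c ≤ q.2 := by
      intro q hq
      rcases List.mem_cons.mp (hmem q hq) with h | h
      · omega
      · exact le_of_lt (hcs.1 _ h)
    set R := qs.filter (fun y => !(y.2 == c)) with hR
    have hRs : R.Pairwise (fun a b => a.2 ≤ b.2) := List.Pairwise.sublist List.filter_sublist hs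
    have hRmem : ∀ q ∈ R, q.2 ∈ cs := by
      intro q hq
      rw [hR, List.mem_filter] at hq
      rcases List.mem_cons.mp (hmem q hq.1) with h | h
      · exfalso; have h2 := hq.2; rw [h] at h2; simp at h2
      · exact h
    have hfilters : ∀ c' ∈ cs, qs.filter (fun y => y.2 == c') = R.filter (fun y => y.2 == c') := by
      intro c' hc'
      have hne : c ≠ c' := by have := hcs.1 c' hc'; omega
      rw [hR, List.filter_filter]
      apply List.filter_congr
      intro z _
      by_cases hz : z.2 = c' <;> simp [hz, Ne.symm hne]
    rw [List.flatMap_cons]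
    have hrest : cs.flatMap (fun c' => qs.filter (fun y => y.2 == c'))
        = cs.flatMap (fun c' => R.filter (fun y => y.2 == c')) := by
      rw [List.flatMap_def, List.flatMap_def]
      exact congrArg List.flatten (List.map_congr_left hfilters)
    rw [hrest, ih R hcs.2 hRs hRmem]
    exact filter_split qs c hs hmin

-- B's bucket walk over any pair list equals the first components of A's stable sort
theorem flat_eq (ps : List (String × Int)) :
    (PySem.List.sorted (PySem.Set.ofList (ps.map (fun p => p.2))) (fun c => c) false).flatMap
        (fun c => (ps.filter (fun kv => kv.2 == c)).map (fun kv => kv.1))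
      = (PySem.List.sorted ps (fun p => p.2) false).map (fun p => p.1) := by
  set qs := PySem.List.sorted ps (fun p => p.2) false with hqs
  set cs := PySem.List.sorted (PySem.Set.ofList (ps.map (fun p => p.2))) (fun c => c) false with hcs
  have h1 : ∀ c ∈ cs, (ps.filter (fun kv => kv.2 == c)).map (fun kv => kv.1)
      = (qs.filter (fun kv => kv.2 == c)).map (fun kv => kv.1) := by
    intro c _
    rw [hqs, filter_sorted]
  rw [List.flatMap_def, List.map_congr_left h1, ← List.flatMap_def, ← List.map_flatMap]
  congr 1
  apply flatMap_filter_eq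
  · exact PySem.List.sorted_ofList_pairwise_lt (ps.map (fun p => p.2))
  · exact PySem.List.sorted_pairwise ps (fun p => p.2)
  · intro q hq
    rw [hcs, PySem.List.mem_sorted, PySem.Set.mem_ofList]
    rw [hqs, PySem.List.mem_sorted] at hq
    exact List.mem_map_of_mem hq

-- ===== VERDICT (by name: the statement is the Claim_ definition above) =====
theorem nth_most_rate_signature_spec : Claim_equal_nth_most_rate_signature := by
  intro array n _ _
  unfold Spec_nth_most_rate_signature nth_most_rate_signature nth_most_rate_signature_alt
  by_cases h : n < (array.length : Int)
  · rw [if_pos h, if_neg (by omega)]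
    rw [show (array.foldl (fun d x => d.insert x (d.getD x 0 + 1)) PySem.Dict.empty)
          = PySem.Dict.counter array from PySem.Dict.foldl_insert_getD_add_one_eq_counter array]
    show (match PySem.List.pyGet? (PySem.List.sorted (PySem.Dict.counter array).items
            (fun item => item.2) false) (n - 1) with
          | some p => p.1
          | none => "")
        = (match PySem.List.pyGet?
              ((PySem.List.sorted (PySem.Set.ofList ((PySem.Dict.counter array).items.map (fun p => p.2)))
                  (fun c => c) false).flatMap
                (fun c => (((PySem.Dict.counter array).items.filter (fun kv => kv.2 == c)).map
                  (fun kv => kv.1)))) (n - 1) with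
          | some k => k
          | none => "")
    rw [flat_eq (PySem.Dict.counter array).items, pyGet?_map_fst]
    cases PySem.List.pyGet? (PySem.List.sorted (PySem.Dict.counter array).items (fun item => item.2) false) (n - 1) with
    | none => rfl
    | some p => rfl
  · rw [if_neg h, if_pos (by omega)]
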